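-- pv_equiv track=rewrite | github.com/safeiris/content | orchestrate.py | _strip_control_characters
-- ===== SOURCE A (Python) =====
-- import unicodedata
-- from typing import Any, Dict, Iterable, List, Optional, Set, Tuple
--
-- def _strip_control_characters(text: str) -> str:
--     allowed_whitespace = {"\n", "\t"}
--     cleaned_chars: List[str] = []
--     for char in text:
--         if char == "\r":
--             cleaned_chars.append("\n")
--             continue
--         if char in allowed_whitespace:
--             cleaned_chars.append(" " if char == "\t" else char)
--             continue
--         if unicodedata.category(char).startswith("C"):
--             continue
--         cleaned_chars.append(char)
--     return "".join(cleaned_chars)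
-- ===== SOURCE B (Python) =====
-- import unicodedata
--
-- def _strip_control_characters(text: str) -> str:
--     # Build a translation table over the distinct characters of the input:
--     # CR -> LF, TAB -> space, other control characters (except LF) -> delete,
--     # everything else absent (kept). Then apply it in one bulk translate pass.
--     table = {}
--     for ch in set(text):
--         if ch == "\r":
--             table[ord(ch)] = "\n"
--         elif ch == "\t":
--             table[ord(ch)] = " "
--         elif ch != "\n" and unicodedata.category(ch).startswith("C"):
--             table[ord(ch)] = None
--     return text.translate(table)
-- ===== Notes on version B (the rewrite author's own statement) =====
-- stated objective: faster
-- what changed: Instead of branching per character inside a Python loop, B precomputes a str.translate mapping table keyed by the distinct characters of the input (CR->LF, TAB->space, control->delete, others absent) and applies it in one bulk translate pass.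
import Mathlib
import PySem

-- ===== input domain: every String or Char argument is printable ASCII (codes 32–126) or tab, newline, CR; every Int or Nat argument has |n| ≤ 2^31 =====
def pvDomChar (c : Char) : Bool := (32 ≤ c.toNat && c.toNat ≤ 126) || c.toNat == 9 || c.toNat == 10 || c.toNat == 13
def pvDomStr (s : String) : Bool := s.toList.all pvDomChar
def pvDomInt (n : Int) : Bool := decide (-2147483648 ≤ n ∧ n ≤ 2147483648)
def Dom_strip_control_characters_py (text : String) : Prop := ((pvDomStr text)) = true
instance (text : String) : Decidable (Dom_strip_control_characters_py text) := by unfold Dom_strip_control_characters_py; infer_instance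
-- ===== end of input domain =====

-- B precomputes a translate-style mapping table over the distinct input characters and applies it in one bulk pass (alternative decomposition; return value only).

-- unicodedata.category(c).startswith("C"): exact on the ASCII domain (codes 9,10,13,32..126), where the
-- "C" categories are exactly the control codes < 32 and 127.
def pyIsCcat (c : Char) : Bool := c.toNat < 32 || c.toNat == 127

-- ===== PORT A =====
def strip_control_characters_py (text : String) : String :=
  String.mk (text.toList.foldl (fun acc c =>
    if c = '\r' then acc ++ ['\n']
    else if c = '\n' ∨ c = '\t' then acc ++ [if c = '\t' then ' ' else c]
    else if pyIsCcat c then acc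
    else acc ++ [c]) [])

-- ===== PORT B =====
-- the table-building loop body: one dict entry per distinct character (value none = delete)
def pvTableStep (d : PySem.Dict Nat (Option Char)) (c : Char) : PySem.Dict Nat (Option Char) :=
  if c = '\r' then d.insert c.toNat (some '\n')
  else if c = '\t' then d.insert c.toNat (some ' ')
  else if c ≠ '\n' ∧ pyIsCcat c then d.insert c.toNat none
  else d

def strip_control_characters_py_alt (text : String) : String :=
  let table := (PySem.Set.ofList text.toList).foldl pvTableStep PySem.Dict.empty
  -- str.translate: per character, absent key = keep, entry none = delete, entry (some r) = replace
  String.mk (text.toList.flatMap (fun c =>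
    match table.get? c.toNat with
    | none => [c]
    | some none => []
    | some (some r) => [r]))

-- ===== PRECONDITION & SPEC =====
def Spec_strip_control_characters_py (text : String) (out : String) : Prop := out = strip_control_characters_py_alt text
instance (text : String) (out : String) : Decidable (Spec_strip_control_characters_py text out) := by unfold Spec_strip_control_characters_py; infer_instance

-- ===== CLAIM =====
def Claim_equal_strip_control_characters_py : Prop := ∀ (text : String), Dom_strip_control_characters_py text → Spec_strip_control_characters_py text (strip_control_characters_py text)

-- ===== LEMMAS AND PROOFS =====

-- the intended entry of the table at a character (none = no entry, i.e. keep)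
def pvEntry (c : Char) : Option (Option Char) :=
  if c = '\r' then some (some '\n')
  else if c = '\t' then some (some ' ')
  else if c ≠ '\n' ∧ pyIsCcat c then some none
  else none

lemma pvTableStep_eq (d : PySem.Dict Nat (Option Char)) (c : Char) :
    pvTableStep d c = match pvEntry c with
      | some v => d.insert c.toNat v
      | none => d := by
  unfold pvTableStep pvEntry
  split_ifs <;> rfl

lemma char_toNat_inj {a b : Char} (h : a.toNat = b.toNat) : a = b :=
  Char.ext (UInt32.toNat_inj.mp (by simpa using h))

lemma table_get_notmem (s : List Char) (d : PySem.Dict Nat (Option Char)) (c : Char)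
    (h : c ∉ s) : (s.foldl pvTableStep d).get? c.toNat = d.get? c.toNat := by
  induction s generalizing d with
  | nil => rfl
  | cons x s ih =>
    simp only [List.mem_cons, not_or] at h
    obtain ⟨hx, hs⟩ := h
    have hne : c.toNat ≠ x.toNat := fun he => hx (char_toNat_inj he)
    simp only [List.foldl_cons]
    rw [ih _ hs, pvTableStep_eq]
    cases pvEntry x with
    | none => rfl
    | some v => exact PySem.Dict.get?_insert_of_ne d v hne

lemma table_get_mem (s : List Char) (d : PySem.Dict Nat (Option Char)) (c : Char)
    (hnd : s.Nodup) (h : c ∈ s) :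
    (s.foldl pvTableStep d).get? c.toNat =
      match pvEntry c with
      | some v => some v
      | none => d.get? c.toNat := by
  induction s generalizing d with
  | nil => cases h
  | cons x s ih =>
    simp only [List.nodup_cons] at hnd
    obtain ⟨hxs, hnds⟩ := hnd
    simp only [List.foldl_cons]
    by_cases hxc : c = x
    · have hcs : c ∉ s := by rw [hxc]; exact hxs
      rw [hxc, table_get_notmem s _ x (hxc ▸ hcs), pvTableStep_eq]
      cases pvEntry x with
      | none => rfl
      | some v => exact PySem.Dict.get?_insert_self ..
    · have hc : c ∈ s := by
        rcases List.mem_cons.mp h with h1 | h1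
        · exact absurd h1 hxc
        · exact h1
      rw [ih _ hnds hc, pvTableStep_eq]
      have hne : c.toNat ≠ x.toNat := fun he => hxc (char_toNat_inj he)
      cases pvEntry x with
      | none => rfl
      | some v =>
        cases pvEntry c with
        | none => exact PySem.Dict.get?_insert_of_ne d v hne
        | some w => rfl

-- what one character contributes in A's loop
def pvAOut (c : Char) : List Char :=
  if c = '\r' then ['\n']
  else if c = '\n' ∨ c = '\t' then [if c = '\t' then ' ' else c]
  else if pyIsCcat c then []
  else [c]

lemma loopA_eq (l : List Char) (acc : List Char) :
    l.foldl (fun acc c =>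
      if c = '\r' then acc ++ ['\n']
      else if c = '\n' ∨ c = '\t' then acc ++ [if c = '\t' then ' ' else c]
      else if pyIsCcat c then acc
      else acc ++ [c]) acc = acc ++ l.flatMap pvAOut := by
  induction l generalizing acc with
  | nil => simp
  | cons c l ih =>
    simp only [List.foldl_cons, List.flatMap_cons, ih]
    unfold pvAOut
    split_ifs <;> simp

lemma pvAOut_eq_entry (c : Char) :
    pvAOut c = (match pvEntry c with
      | none => [c]
      | some none => []
      | some (some r) => [r]) := by
  unfold pvAOut pvEntry
  by_cases h1 : c = '\r'
  · simp [h1]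
  · by_cases h2 : c = '\t'
    · simp [h2]
    · by_cases h3 : c = '\n'
      · simp [h3]
      · have hne : ¬ (c = '\n' ∨ c = '\t') := by tauto
        by_cases h4 : pyIsCcat c <;> simp [h1, h2, h3, h4]

-- ===== VERDICT =====
theorem strip_control_characters_py_spec : Claim_equal_strip_control_characters_py := by
  intro text _
  unfold Spec_strip_control_characters_py strip_control_characters_py strip_control_characters_py_alt
  rw [loopA_eq]
  simp only [List.nil_append]
  congr 1
  apply List.flatMap_congr
  intro c hc
  rw [table_get_mem _ _ _ (PySem.Set.nodup_ofList _) ((PySem.Set.mem_ofList _ _).mpr hc),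
    pvAOut_eq_entry]
  cases pvEntry c with
  | none => simp [PySem.Dict.get?_empty]
  | some v => cases v <;> rfl
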